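-- pv_equiv track=rewrite | github.com/marlonp97/Eafit-EDA1 | laboratorios/lab02/ejercicioEnLinea/Laboratorio02 - Punto2.py | seriesUp
-- ===== SOURCE A (Python) =====
-- def seriesUp(n):
--   array = [None]*(n*(n+1)//2)
--   num = 0
--   for i in range(n):
--     for j in range(i+1):
--       array[num] = j+1
--       num = num+1
--   return array
-- ===== SOURCE B (Python) =====
-- def seriesUp(n):
--   out = []
--   val = 1
--   limit = 1
--   for _ in range(n*(n+1)//2):
--     out.append(val)
--     if val == limit:
--       val = 1
--       limit = limit + 1
--     else:
--       val = val + 1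
--   return out
-- ===== Notes on version B (the rewrite author's own statement) =====
-- stated objective: alternative
-- what changed: Replaces the nested (i,j) loop writing into a preallocated None array via a manual index with a single flat loop of n*(n+1)//2 iterations driven by a val/limit reset counter appending to a list.
-- outside the precondition, e.g. on seriesUp(-2): A returns [None], B returns [1]; on seriesUp(-3): A returns [None, None, None], B returns [1, 1, 2]
import Mathlib
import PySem

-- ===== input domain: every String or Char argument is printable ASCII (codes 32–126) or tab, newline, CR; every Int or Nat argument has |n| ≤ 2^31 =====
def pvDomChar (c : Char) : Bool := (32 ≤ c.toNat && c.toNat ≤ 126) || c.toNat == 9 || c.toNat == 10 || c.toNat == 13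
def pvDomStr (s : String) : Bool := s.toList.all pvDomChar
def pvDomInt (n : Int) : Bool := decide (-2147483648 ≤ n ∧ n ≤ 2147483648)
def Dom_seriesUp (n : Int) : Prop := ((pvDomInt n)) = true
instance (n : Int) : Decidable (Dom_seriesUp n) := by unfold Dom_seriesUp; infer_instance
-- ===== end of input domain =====

-- B replaces A's nested (i,j) loop writing through a manual index into a preallocated
-- array by one flat loop of n*(n+1)//2 iterations driven by a val/limit reset counter.

-- ===== PORT A =====
-- '[None]*size' is modelled as a list of 0s: inside Pre_ every cell is overwritten
-- before the list is returned, so the placeholder value is never observable.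
def seriesUp (n : Int) : List Int :=
  let array : List Int := List.replicate (PySem.Int.floordiv (n * (n + 1)) 2).toNat 0
  let st := (PySem.List.pyRange 0 n 1).foldl
    (fun (st : List Int × Int) i =>
      (PySem.List.pyRange 0 (i + 1) 1).foldl
        (fun (st : List Int × Int) j => (st.1.set st.2.toNat (j + 1), st.2 + 1)) st)
    (array, 0)
  st.1

-- ===== PORT B =====
def seriesUp_alt (n : Int) : List Int :=
  let st := (PySem.List.pyRange 0 (PySem.Int.floordiv (n * (n + 1)) 2) 1).foldl
    (fun (st : List Int × Int × Int) _ =>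
      let out := st.1 ++ [st.2.1]
      if st.2.1 == st.2.2 then (out, 1, st.2.2 + 1) else (out, st.2.1 + 1, st.2.2))
    ([], 1, 1)
  st.1

-- ===== PRECONDITION & SPEC =====
-- Pre_ excludes n ≤ -2, where Python A returns a list of Nones (size n*(n+1)//2 > 0
-- but the filling loop never runs) — not a value of the declared List Int type.
def Pre_seriesUp (n : Int) : Prop := -1 ≤ n
instance (n : Int) : Decidable (Pre_seriesUp n) := by unfold Pre_seriesUp; infer_instance
def pvWitness_seriesUp : Int := (4)
def Spec_seriesUp (n : Int) (out : List Int) : Prop := out = seriesUp_alt n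
instance (n : Int) (out : List Int) : Decidable (Spec_seriesUp n out) := by unfold Spec_seriesUp; infer_instance

-- ===== CLAIM (what is proved, stated in full; the proofs are below) =====
def Claim_equal_seriesUp : Prop := ∀ (n : Int), Dom_seriesUp n → Pre_seriesUp n → Spec_seriesUp n (seriesUp n)

-- ===== LEMMAS AND PROOFS =====

-- the triangular series, row by row: rowFrom d v = [v, v+1, …, v+d-1]
def rowFrom : Nat → Int → List Int
  | 0, _ => []
  | d + 1, v => v :: rowFrom d (v + 1)

def tri : Nat → List Int
  | 0 => []
  | m + 1 => tri m ++ rowFrom (m + 1) 1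

theorem rowFrom_length (d : Nat) (v : Int) : (rowFrom d v).length = d := by
  induction d generalizing v with
  | zero => rfl
  | succ d ih => simp [rowFrom, ih]

theorem tri_length (m : Nat) : (tri m).length * 2 = m * (m + 1) := by
  induction m with
  | zero => rfl
  | succ m ih =>
    have h : (tri (m + 1)).length = (tri m).length + (m + 1) := by
      simp [tri, rowFrom_length]
    rw [h, Nat.add_mul, ih]; ring

theorem floordiv_tri (m : Nat) :
    PySem.Int.floordiv ((m : Int) * ((m : Int) + 1)) 2 = ((tri m).length : Int) := by
  have h := tri_length m
  have : (m : Int) * ((m : Int) + 1) = ((m * (m + 1) : Nat) : Int) := by push_cast; ring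
  rw [this]
  rw [show ((m * (m + 1) : Nat) : Int) = ((tri m).length : Int) * 2 by push_cast; omega]
  rw [PySem.Int.floordiv_eq_ediv_of_pos (by norm_num)]
  omega

-- ---------- A side ----------

def writeF (st : List Int × Int) (v : Int) : List Int × Int :=
  (st.1.set st.2.toNat v, st.2 + 1)

theorem write_fill : ∀ (vs pre : List Int) (r : Nat),
    vs.foldl writeF (pre ++ List.replicate (vs.length + r) 0, (pre.length : Int))
      = (pre ++ vs ++ List.replicate r 0, ((pre.length + vs.length : Nat) : Int)) := by
  intro vs
  induction vs with
  | nil => intro pre r; simp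
  | cons v vs ih =>
    intro pre r
    have hset : (pre ++ List.replicate (vs.length + r + 1) 0).set pre.length v
        = (pre ++ [v]) ++ List.replicate (vs.length + r) 0 := by
      rw [show vs.length + r + 1 = 1 + (vs.length + r) by omega, List.replicate_add]
      rw [List.set_append_right _ _ (le_refl _)]
      simp [List.replicate]
    simp only [List.foldl_cons, writeF, List.length_cons]
    rw [show ((pre.length : Int)).toNat = pre.length by omega]
    rw [show vs.length + 1 + r = vs.length + r + 1 by omega, hset]
    rw [show (pre.length : Int) + 1 = (((pre ++ [v]).length : Nat) : Int) by simp]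
    rw [ih (pre ++ [v]) r]
    simp [List.append_assoc]
    omega

theorem foldl_flat (g : Int → List Int) :
    ∀ (l : List Int) (st : List Int × Int),
    l.foldl (fun st i => (g i).foldl writeF st) st = (l.flatMap g).foldl writeF st := by
  intro l
  induction l with
  | nil => intro st; rfl
  | cons x l ih => intro st; simp [List.foldl_cons, List.flatMap_cons, List.foldl_append, ih]

theorem map_pyRange_rowFrom : ∀ (k : Nat) (a : Int),
    (PySem.List.pyRange a (a + k) 1).map (fun j => j + 1) = rowFrom k (a + 1) := by
  intro k
  induction k with
  | zero => intro a; simp [PySem.List.pyRange_one_eq_nil, rowFrom]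
  | succ k ih =>
    intro a
    rw [PySem.List.pyRange_one_cons (by omega)]
    simp only [List.map_cons, rowFrom]
    rw [show a + (k + 1 : Nat) = (a + 1) + (k : Nat) by push_cast; ring]
    rw [ih (a + 1)]

def flatvals (m : Nat) : List Int :=
  (PySem.List.pyRange 0 (m : Int) 1).flatMap
    (fun i => (PySem.List.pyRange 0 (i + 1) 1).map (fun j => j + 1))

theorem flatvals_eq_tri (m : Nat) : flatvals m = tri m := by
  induction m with
  | zero => rfl
  | succ m ih =>
    unfold flatvals at *
    rw [show ((m + 1 : Nat) : Int) = (m : Int) + 1 by push_cast; ring]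
    rw [PySem.List.pyRange_one_succ_right (by omega)]
    rw [List.flatMap_append, ih]
    simp only [List.flatMap_cons, List.flatMap_nil, List.append_nil, tri]
    congr 1
    have := map_pyRange_rowFrom (m + 1) 0
    simpa using this

theorem seriesUp_eq_tri (m : Nat) : seriesUp (m : Int) = tri m := by
  unfold seriesUp
  simp only []
  rw [show (m : Int) * ((m : Int) + 1) = (m : Int) * ((m : Int) + 1) from rfl]
  rw [floordiv_tri m]
  have hbody : ((PySem.List.pyRange 0 (m : Int) 1).foldl
      (fun (st : List Int × Int) i =>
        (PySem.List.pyRange 0 (i + 1) 1).foldl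
          (fun (st : List Int × Int) j => (st.1.set st.2.toNat (j + 1), st.2 + 1)) st)
      (List.replicate ((tri m).length : Int).toNat 0, 0))
      = (flatvals m).foldl writeF (List.replicate ((tri m).length : Int).toNat 0, 0) := by
    unfold flatvals
    rw [← foldl_flat]
    apply PySem.List.foldl_congr_mem
    intro st i _
    rw [List.foldl_map]
    rfl
  rw [hbody, flatvals_eq_tri]
  have := write_fill (tri m) [] 0
  simp only [List.nil_append, List.length_nil, Nat.cast_zero, Nat.add_zero] at this
  rw [show ((tri m).length : Int).toNat = (tri m).length by omega]
  rw [this]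
  simp

-- ---------- B side ----------

def stepB (st : List Int × Int × Int) : List Int × Int × Int :=
  let out := st.1 ++ [st.2.1]
  if st.2.1 == st.2.2 then (out, 1, st.2.2 + 1) else (out, st.2.1 + 1, st.2.2)

theorem foldl_const {α β : Type} (f : β → β) :
    ∀ (l : List α) (init : β), l.foldl (fun st _ => f st) init = f^[l.length] init := by
  intro l
  induction l with
  | nil => intro init; rfl
  | cons x l ih => intro init; simp [List.foldl_cons, ih, Function.iterate_succ_apply]

theorem stepB_row : ∀ (d : Nat) (v L : Int) (out : List Int), v + d = L →
    stepB^[d + 1] (out, v, L) = (out ++ rowFrom (d + 1) v, 1, L + 1) := by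
  intro d
  induction d with
  | zero =>
    intro v L out h
    have : v = L := by omega
    subst this
    simp [stepB, rowFrom]
  | succ d ih =>
    intro v L out h
    have hne : v ≠ L := by omega
    rw [show d + 1 + 1 = (d + 1) + 1 by rfl, Function.iterate_succ_apply]
    have hstep : stepB (out, v, L) = (out ++ [v], v + 1, L) := by
      simp [stepB, hne]
    rw [hstep, ih (v + 1) L (out ++ [v]) (by push_cast at h ⊢; omega)]
    simp [rowFrom]

theorem stepB_tri (m : Nat) :
    stepB^[(tri m).length] ([], 1, 1) = (tri m, 1, (m : Int) + 1) := by
  induction m with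
  | zero => simp [tri]
  | succ m ih =>
    have hlen : (tri (m + 1)).length = (m + 1) + (tri m).length := by
      simp [tri, rowFrom_length]; omega
    rw [hlen, Function.iterate_add_apply, ih]
    have := stepB_row m 1 ((m : Int) + 1) (tri m) (by omega)
    rw [this]
    simp [tri]

theorem seriesUp_alt_eq_tri (m : Nat) : seriesUp_alt (m : Int) = tri m := by
  unfold seriesUp_alt
  simp only []
  rw [floordiv_tri m]
  have hlam : (fun (st : List Int × Int × Int) (_ : Int) =>
      let out := st.1 ++ [st.2.1]
      if st.2.1 == st.2.2 then (out, 1, st.2.2 + 1) else (out, st.2.1 + 1, st.2.2))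
      = fun st _ => stepB st := rfl
  rw [hlam, foldl_const stepB]
  rw [show (PySem.List.pyRange 0 ((tri m).length : Int) 1).length = (tri m).length by
    rw [PySem.List.length_pyRange_one]; omega]
  rw [stepB_tri m]

-- ===== VERDICT (by name: the statement is the Claim_ definition above) =====
theorem seriesUp_spec : Claim_equal_seriesUp := by
  intro n _ hpre
  unfold Spec_seriesUp
  by_cases h : 0 ≤ n
  · have : n = ((n.toNat : Nat) : Int) := by omega
    rw [this, seriesUp_eq_tri, seriesUp_alt_eq_tri]
  · have : n = -1 := by unfold Pre_seriesUp at hpre; omega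
    subst this
    decide
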